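-- pv_equiv track=rewrite | github.com/gemma-Kim/Algorithm | python/algorithm.py | solution
-- ===== SOURCE A (Python) =====
-- import heapq
--
-- def solution(scoville, K):
--     heapq.heapify(scoville)
--     count = 0
--     while scoville[0] < K:
--         try:
--             heapq.heappush(scoville, heapq.heappop(scoville)+(2*heapq.heappop(scoville)))
--         except IndexError:
--             return -1
--         count += 1
--     return count
-- ===== SOURCE B (Python) =====
-- def _insort(lst, x):
--     # insert x into the sorted list lst, keeping it sorted (linear scan)
--     i = 0
--     while i < len(lst) and lst[i] < x:
--         i += 1
--     lst.insert(i, x)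
--
--
-- def solution(scoville, K):
--     lst = sorted(scoville)
--     count = 0
--     while lst[0] < K:
--         a = lst.pop(0)
--         if not lst:
--             return -1
--         b = lst.pop(0)
--         _insort(lst, a + 2 * b)
--         count += 1
--     return count
-- ===== Notes on version B (the rewrite author's own statement) =====
-- stated objective: alternative
-- what changed: Replaces the binary heap with a sorted list: sort once, pop the two smallest from the front and re-insert the mix at its sorted position, so no heap invariant or sift operations are needed.
import Mathlib
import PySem

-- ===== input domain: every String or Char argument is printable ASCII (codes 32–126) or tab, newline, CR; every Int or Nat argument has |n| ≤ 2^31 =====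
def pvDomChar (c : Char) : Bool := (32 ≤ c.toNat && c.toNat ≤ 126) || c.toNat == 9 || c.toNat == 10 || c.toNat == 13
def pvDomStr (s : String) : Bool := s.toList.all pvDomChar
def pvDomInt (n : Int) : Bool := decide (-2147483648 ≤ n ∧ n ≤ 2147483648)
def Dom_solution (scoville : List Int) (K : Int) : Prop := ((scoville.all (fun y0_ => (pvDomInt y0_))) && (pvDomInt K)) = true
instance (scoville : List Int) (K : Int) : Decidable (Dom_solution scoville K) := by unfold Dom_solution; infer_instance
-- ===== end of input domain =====

-- B replaces A's binary heap with a sorted list (sort once, pop the two smallest from the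
-- front, insert the mix at its sorted position); equivalence is about the RETURN value only —
-- A leaves `scoville` heapified in place, B does not mutate it (B sorts a copy).


-- ===== PORT A =====
-- A's heap is ported at the level of heapq's contract on Int values: heappop returns the
-- minimum element of the heap (`List.min?` + erase of one occurrence), heappush adds an
-- element; the loop is the obvious recursion on the heap contents.  The `none` branch of the
-- outer `min?` is Python's uncaught IndexError on `scoville[0]` (excluded by Pre_solution).
def solutionLoop (h : List Int) (K : Int) (count : Int) : Int :=
  match hm : h.min? with
  | none => 0  -- unreachable under Pre_solution: Python raises IndexError on scoville[0]
  | some m =>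
    if m < K then
      match hb : (h.erase m).min? with
      | none => -1
      | some b => solutionLoop ((h.erase m).erase b ++ [m + 2 * b]) K (count + 1)
    else count
  termination_by h.length
  decreasing_by
    have h1 : m ∈ h := List.min?_mem hm
    have h2 : b ∈ h.erase m := List.min?_mem hb
    have e1 := List.length_erase_of_mem h1
    have e2 := List.length_erase_of_mem h2
    have hp : 0 < (h.erase m).length := List.length_pos_of_mem h2
    simp only [List.length_append, List.length_cons, List.length_nil]
    omega

def solution (scoville : List Int) (K : Int) : Int :=
  solutionLoop scoville K 0

-- ===== PORT B =====
-- `_insort` from Source B: linear scan past the elements below x, insert x there.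
def insortL (x : Int) : List Int → List Int
  | [] => [x]
  | b :: t => if b < x then b :: insortL x t else x :: b :: t

theorem length_insortL (x : Int) (l : List Int) : (insortL x l).length = l.length + 1 := by
  induction l with
  | nil => rfl
  | cons b t ih => by_cases hb : b < x <;> simp [insortL, hb, ih]

def altLoop (s : List Int) (K : Int) (count : Int) : Int :=
  match s with
  | [] => 0  -- unreachable under Pre_solution: Python raises IndexError on lst[0]
  | a :: rest =>
    if a < K then
      match rest with
      | [] => -1
      | b :: rest2 => altLoop (insortL (a + 2 * b) rest2) K (count + 1)
    else count
  termination_by s.length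
  decreasing_by simp [length_insortL]

def solution_alt (scoville : List Int) (K : Int) : Int :=
  altLoop (PySem.List.sorted scoville (fun x => x) false) K 0

-- ===== PRECONDITION & SPEC =====
-- Pre_ excludes only the empty list, on which A raises an uncaught IndexError at scoville[0].
def Pre_solution (scoville : List Int) (K : Int) : Prop := scoville ≠ []
instance (scoville : List Int) (K : Int) : Decidable (Pre_solution scoville K) := by unfold Pre_solution; infer_instance
def pvWitness_solution : List Int × Int := ([1, 2, 3, 9, 10, 12], 7)
def Spec_solution (scoville : List Int) (K : Int) (out : Int) : Prop := out = solution_alt scoville K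
instance (scoville : List Int) (K : Int) (out : Int) : Decidable (Spec_solution scoville K out) := by unfold Spec_solution; infer_instance

-- ===== CLAIM (what is proved, stated in full; the proofs are below) =====
def Claim_equal_solution : Prop := ∀ (scoville : List Int) (K : Int), Dom_solution scoville K → Pre_solution scoville K → Spec_solution scoville K (solution scoville K)

-- ===== LEMMAS AND PROOFS =====

theorem perm_insortL (x : Int) (l : List Int) : (insortL x l).Perm (x :: l) := by
  induction l with
  | nil => exact List.Perm.refl _
  | cons b t ih =>
    by_cases hb : b < x
    · simp only [insortL, hb, if_true]
      exact (ih.cons b).trans (List.Perm.swap x b t)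
    · simp only [insortL, hb, if_false]
      exact List.Perm.refl _

theorem mem_insortL {y x : Int} {l : List Int} (h : y ∈ insortL x l) : y = x ∨ y ∈ l := by
  have := (perm_insortL x l).mem_iff.mp h
  simpa using this

theorem pairwise_insortL (x : Int) {l : List Int} (hl : l.Pairwise (· ≤ ·)) :
    (insortL x l).Pairwise (· ≤ ·) := by
  induction l with
  | nil => simp [insortL]
  | cons b t ih =>
    rcases List.pairwise_cons.mp hl with ⟨hbt, ht⟩
    by_cases hb : b < x
    · simp only [insortL, hb, if_true]
      refine List.pairwise_cons.mpr ⟨?_, ih ht⟩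
      intro y hy
      rcases mem_insortL hy with rfl | hy'
      · exact le_of_lt hb
      · exact hbt y hy'
    · simp only [insortL, hb, if_false]
      refine List.pairwise_cons.mpr ⟨?_, hl⟩
      intro y hy
      rcases List.mem_cons.mp hy with rfl | hy'
      · exact le_of_not_gt hb
      · exact le_trans (le_of_not_gt hb) (hbt y hy')

theorem min?_of_sorted_perm {h s : List Int} {a : Int} (hperm : s.Perm h)
    (hsort : s.Pairwise (· ≤ ·)) (hs : s = a :: s.tail) : h.min? = some a := by
  rw [List.min?_eq_some_iff]
  constructor
  · exact hperm.subset (hs ▸ List.mem_cons_self)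
  · intro y hy
    have hy' : y ∈ s := hperm.mem_iff.mpr hy
    rw [hs] at hy' hsort
    rcases List.mem_cons.mp hy' with rfl | hy''
    · exact le_refl _
    · exact (List.pairwise_cons.mp hsort).1 y hy''

-- the central invariant: the heap loop and the sorted-list loop agree whenever the heap
-- contents are a permutation of the (sorted) list
theorem loop_eq (n : Nat) : ∀ (h s : List Int) (K count : Int), h.length ≤ n →
    s.Perm h → s.Pairwise (· ≤ ·) → solutionLoop h K count = altLoop s K count := by
  induction n with
  | zero =>
    intro h s K count hn hperm _
    have : h = [] := List.length_eq_zero_iff.mp (Nat.le_zero.mp hn)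
    subst this
    have hs : s = [] := List.Perm.eq_nil hperm
    subst hs
    simp [solutionLoop, altLoop]
  | succ n ih =>
    intro h s K count hn hperm hsort
    match s with
    | [] =>
      have : h = [] := List.Perm.eq_nil hperm.symm
      subst this
      simp [solutionLoop, altLoop]
    | a :: rest =>
      have hmin : h.min? = some a := min?_of_sorted_perm hperm hsort rfl
      have hsort1 : rest.Pairwise (· ≤ ·) := (List.pairwise_cons.mp hsort).2
      have hperm1 : rest.Perm (h.erase a) := by simpa using hperm.erase a
      rw [solutionLoop]
      split
      · rename_i hm
        rw [hm] at hmin; cases hmin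
      · rename_i m hm
        rw [hm] at hmin
        injection hmin with hma
        subst hma
        by_cases hK : m < K
        · rw [if_pos hK]
          split
          · -- second pop fails: h.erase m is empty, hence rest is empty
            rename_i hb
            have hre : h.erase m = [] := List.min?_eq_none_iff.mp hb
            have hrest : rest = [] := List.Perm.eq_nil (hre ▸ hperm1)
            subst hrest
            rw [altLoop.eq_def]
            simp [hK]
          · rename_i b hb
            match rest, hperm1, hsort1 with
            | [], hperm1, _ =>
              have hre : h.erase m = [] := List.Perm.eq_nil hperm1.symm
              rw [hre] at hb
              cases hb
            | b' :: rest2, hperm1, hsort1 =>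
              have hminb : (h.erase m).min? = some b' := min?_of_sorted_perm hperm1 hsort1 rfl
              rw [hb] at hminb
              injection hminb with hbb
              subst hbb
              have hperm2 : rest2.Perm ((h.erase m).erase b) := by
                simpa using hperm1.erase b
              have hpermNew : (insortL (m + 2 * b) rest2).Perm ((h.erase m).erase b ++ [m + 2 * b]) := by
                refine (perm_insortL _ _).trans ?_
                have hcomm : ((m + 2 * b) :: rest2).Perm (rest2 ++ [m + 2 * b]) :=
                  List.perm_append_comm (l₁ := [m + 2 * b]) (l₂ := rest2)
                exact hcomm.trans (hperm2.append_right _)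
              have hsortNew : (insortL (m + 2 * b) rest2).Pairwise (· ≤ ·) :=
                pairwise_insortL _ (List.pairwise_cons.mp hsort1).2
              have hlen : ((h.erase m).erase b ++ [m + 2 * b]).length ≤ n := by
                have h1 := hperm2.length_eq
                have h2 := hperm.length_eq
                simp only [List.length_append, List.length_cons, List.length_nil] at *
                omega
              rw [altLoop.eq_def]
              simp only [hK, if_true]
              exact ih _ _ K (count + 1) hlen hpermNew hsortNew
        · rw [if_neg hK, altLoop.eq_def]
          simp [hK]

-- ===== VERDICT (by name: the statement is the Claim_ definition above) =====
theorem solution_spec : Claim_equal_solution := by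
  intro scoville K _ _
  unfold Spec_solution solution solution_alt
  exact (loop_eq scoville.length scoville _ K 0 (le_refl _)
    (PySem.List.sorted_perm ..) (by simpa using PySem.List.sorted_pairwise (xs := scoville) (key := fun x => x)))
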